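-- pv_equiv track=rewrite | github.com/9ml121/07-leetcode-python | F-贪心算法/1247. 交换字符使得字符串相同.py | minimumSwap
-- ===== SOURCE A (Python) =====
-- def minimumSwap(s1: str, s2: str) -> int:
--     # 1.先排除掉对应位置字符一样的元素
--     n = len(s1)
--     new_s1 = ''
--     new_s2 = ''
--     for i in range(n):
--         if s1[i] == s2[i]:
--             continue
--         new_s1 += s1[i]
--         new_s2 += s2[i]
--
--     # 2.归纳最后配对结果需要的最少交换次数
--     if len(new_s1) % 2 == 1:
--         return -1
--
--     cnt_x, cnt_y = 0, 0
--     for c in new_s1: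
--         if c == 'x':
--             cnt_x += 1
--         else:
--             cnt_y += 1
--     res = cnt_x // 2 + cnt_x % 2 + cnt_y // 2 + cnt_y % 2
--     return res
-- ===== SOURCE B (Python) =====
-- def minimumSwap(s1: str, s2: str) -> int:
--     # Greedy streaming pairing: keep at most one pending mismatch of each kind;
--     # a second mismatch of the same kind is paired off with one swap, and if one
--     # pending mismatch of each kind is left, that cross pair costs two swaps.
--     swaps = 0
--     pend_xy = False
--     pend_yx = False
--     for a, b in zip(s1, s2):
--         if a == b:
--             continue
--         if a == 'x':
--             if pend_xy:
--                 swaps += 1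
--                 pend_xy = False
--             else:
--                 pend_xy = True
--         else:
--             if pend_yx:
--                 swaps += 1
--                 pend_yx = False
--             else:
--                 pend_yx = True
--     if pend_xy and pend_yx:
--         return swaps + 2
--     if pend_xy or pend_yx:
--         return -1
--     return swaps
-- ===== Notes on version B (the rewrite author's own statement) =====
-- stated objective: faster
-- what changed: B replaces A's build-two-filtered-strings-then-count-and-divide arithmetic by a single streaming greedy pairing: it holds at most one pending mismatch of each kind, emits one swap whenever a pending mismatch is paired with a second of the same kind, charges 2 for a leftover cross pair and returns -1 if exactly one mismatch is left pending; no strings are built and no division is used.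
import Mathlib
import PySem

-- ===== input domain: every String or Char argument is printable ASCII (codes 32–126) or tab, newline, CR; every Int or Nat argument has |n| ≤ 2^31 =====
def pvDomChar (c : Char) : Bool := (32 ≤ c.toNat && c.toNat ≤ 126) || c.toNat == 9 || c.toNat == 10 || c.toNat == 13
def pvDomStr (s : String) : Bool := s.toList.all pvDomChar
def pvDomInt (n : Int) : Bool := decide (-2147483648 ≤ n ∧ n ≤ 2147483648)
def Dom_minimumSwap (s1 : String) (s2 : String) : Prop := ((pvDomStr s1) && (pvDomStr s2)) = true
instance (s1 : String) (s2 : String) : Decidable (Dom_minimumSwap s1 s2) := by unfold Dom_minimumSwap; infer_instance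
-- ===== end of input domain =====

-- B replaces A's build-filtered-strings-then-count-and-divide computation by a single
-- streaming greedy pairing of mismatches with O(1) state (objective: faster, constant-factor).
-- ===== PORT A =====
-- for i in range(n): indexing s1[i]/s2[i]; in-range for s1 by construction, for s2 under Pre_
-- (getD's default is never read inside Pre_); new_s1/new_s2 are the built mismatch strings as char lists.
def minimumSwap (s1 : String) (s2 : String) : Int :=
  let l1 := s1.toList
  let l2 := s2.toList
  let n := l1.length
  let p := (List.range n).foldl
    (fun (acc : List Char × List Char) i =>
      if l1.getD i ' ' = l2.getD i ' ' then acc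
      else (acc.1 ++ [l1.getD i ' '], acc.2 ++ [l2.getD i ' '])) ([], [])
  if PySem.Int.mod (p.1.length : Int) 2 = 1 then -1
  else
    let c := p.1.foldl
      (fun (cnt : Int × Int) ch => if ch = 'x' then (cnt.1 + 1, cnt.2) else (cnt.1, cnt.2 + 1))
      (0, 0)
    PySem.Int.floordiv c.1 2 + PySem.Int.mod c.1 2 + PySem.Int.floordiv c.2 2 + PySem.Int.mod c.2 2

-- ===== PORT B =====
-- State is (swaps, pend_xy, pend_yx); each mismatch either pairs with the pending one of
-- its kind (one swap) or becomes pending; leftover cross pair costs 2, single leftover → -1.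
def minimumSwap_alt (s1 : String) (s2 : String) : Int :=
  let st := (List.zip s1.toList s2.toList).foldl
    (fun (st : Int × Bool × Bool) p =>
      if p.1 = p.2 then st
      else if p.1 = 'x' then
        (if st.2.1 then (st.1 + 1, false, st.2.2) else (st.1, true, st.2.2))
      else
        (if st.2.2 then (st.1 + 1, st.2.1, false) else (st.1, st.2.1, true)))
    (0, false, false)
  if st.2.1 && st.2.2 then st.1 + 2
  else if st.2.1 || st.2.2 then -1
  else st.1

-- ===== PRECONDITION & SPEC =====
-- A indexes s2 at every position of s1, so it raises IndexError when s2 is shorter than s1.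
def Pre_minimumSwap (s1 : String) (s2 : String) : Prop := s1.toList.length ≤ s2.toList.length
instance (s1 : String) (s2 : String) : Decidable (Pre_minimumSwap s1 s2) := by unfold Pre_minimumSwap; infer_instance
def pvWitness_minimumSwap : String × String := ("xxyy", "yyxx")

def Spec_minimumSwap (s1 : String) (s2 : String) (out : Int) : Prop := out = minimumSwap_alt s1 s2
instance (s1 : String) (s2 : String) (out : Int) : Decidable (Spec_minimumSwap s1 s2 out) := by unfold Spec_minimumSwap; infer_instance

-- ===== CLAIM (what is proved, stated in full; the proofs are below) =====
def Claim_equal_minimumSwap : Prop := ∀ (s1 : String) (s2 : String), Dom_minimumSwap s1 s2 → Pre_minimumSwap s1 s2 → Spec_minimumSwap s1 s2 (minimumSwap s1 s2)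

-- ===== LEMMAS AND PROOFS =====

-- counts of the two mismatch kinds, phrased as A's program produces them
def xcnt (z : List (Char × Char)) : Nat :=
  ((z.filter (fun p => !(p.1 == p.2))).map Prod.fst).countP (fun ch => ch == 'x')
def ycnt (z : List (Char × Char)) : Nat :=
  ((z.filter (fun p => !(p.1 == p.2))).map Prod.fst).countP (fun ch => !(ch == 'x'))

-- Indexed traversal of the common prefix is traversal of the zip.
lemma range_map_getD_eq_zip (l1 l2 : List Char) (h : l1.length ≤ l2.length) :
    (List.range l1.length).map (fun i => (l1.getD i ' ', l2.getD i ' ')) = List.zip l1 l2 := by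
  apply List.ext_getElem
  · simp [List.length_zip, Nat.min_eq_left h]
  · intro i h1 h2
    have hi1 : i < l1.length := by simpa using h1
    have hi2 : i < l2.length := lt_of_lt_of_le hi1 h
    simp [List.getD_eq_getElem?_getD, hi1, hi2, List.getElem_zip]

-- A's mismatch-pair loop: the first component is the mismatched chars of s1, in order.
lemma fst_pair_fold (z : List (Char × Char)) :
    (z.foldl (fun (acc : List Char × List Char) p =>
        if p.1 = p.2 then acc else (acc.1 ++ [p.1], acc.2 ++ [p.2])) ([], [])).1
      = (z.filter (fun p => !(p.1 == p.2))).map Prod.fst := by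
  have h : ∀ (a : List Char × List Char),
      (z.foldl (fun (acc : List Char × List Char) p =>
          if p.1 = p.2 then acc else (acc.1 ++ [p.1], acc.2 ++ [p.2])) a).1
        = a.1 ++ (z.filter (fun p => !(p.1 == p.2))).map Prod.fst := by
    induction z with
    | nil => intro a; simp
    | cons hd tl ih =>
      intro a
      by_cases hc : hd.1 = hd.2 <;> simp [List.foldl_cons, hc, ih]
  simpa using h ([], [])

-- A's counting loop (two accumulators) is the two countP's.
lemma count_fold (m : List Char) (a b : Int) :
    m.foldl (fun (cnt : Int × Int) ch => if ch = 'x' then (cnt.1 + 1, cnt.2) else (cnt.1, cnt.2 + 1)) (a, b)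
      = (a + (m.countP (fun ch => ch == 'x') : Int), b + (m.countP (fun ch => !(ch == 'x')) : Int)) := by
  induction m generalizing a b with
  | nil => simp
  | cons hd tl ih =>
    by_cases hc : hd = 'x' <;> simp [List.foldl_cons, hc, ih] <;> ring

-- countP of a predicate and its negation add up to the length.
lemma countP_split (m : List Char) (p : Char → Bool) :
    m.countP p + m.countP (fun ch => !(p ch)) = m.length := by
  induction m with
  | nil => rfl
  | cons hd tl ih => by_cases hc : p hd <;> simp [hc] <;> omega

-- B's greedy pairing loop, characterised: swaps gained = pairs closed; pendings = parities.
lemma bfold (z : List (Char × Char)) (s : Int) (px py : Bool) :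
    z.foldl (fun (st : Int × Bool × Bool) p =>
        if p.1 = p.2 then st
        else if p.1 = 'x' then
          (if st.2.1 then (st.1 + 1, false, st.2.2) else (st.1, true, st.2.2))
        else
          (if st.2.2 then (st.1 + 1, st.2.1, false) else (st.1, st.2.1, true))) (s, px, py)
      = (s + (((xcnt z + px.toNat) / 2 : Nat) : Int) + (((ycnt z + py.toNat) / 2 : Nat) : Int),
         (xcnt z + px.toNat) % 2 == 1, (ycnt z + py.toNat) % 2 == 1) := by
  induction z generalizing s px py with
  | nil =>
    cases px <;> cases py <;> simp [xcnt, ycnt]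
  | cons hd tl ih =>
    obtain ⟨a, b⟩ := hd
    by_cases hc : a = b
    · simp [List.foldl_cons, hc, ih, xcnt, ycnt]
    · by_cases hx : a = 'x'
      · subst hx
        cases px <;>
          simp [List.foldl_cons, hc, ih, xcnt, ycnt] <;>
          refine ⟨?_, ?_, ?_⟩ <;> omega
      · cases py <;>
          simp [List.foldl_cons, hc, hx, ih, xcnt, ycnt] <;>
          refine ⟨?_, ?_, ?_⟩ <;> omega

-- Final arithmetic: A's division formula equals B's greedy bookkeeping, for nonnegative counts.
lemma arith_eq (x y : Nat) :
    (if PySem.Int.mod (((x + y : Nat)) : Int) 2 = 1 then (-1 : Int)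
     else PySem.Int.floordiv (x : Int) 2 + PySem.Int.mod (x : Int) 2 + PySem.Int.floordiv (y : Int) 2 + PySem.Int.mod (y : Int) 2)
    = (if (x % 2 == 1) && (y % 2 == 1) then ((x / 2 : Nat) : Int) + ((y / 2 : Nat) : Int) + 2
       else if (x % 2 == 1) || (y % 2 == 1) then -1
       else ((x / 2 : Nat) : Int) + ((y / 2 : Nat) : Int)) := by
  have hx : PySem.Int.floordiv (x : Int) 2 = ((x / 2 : Nat) : Int) := by
    exact_mod_cast PySem.Int.floordiv_natCast x 2
  have hmx : PySem.Int.mod (x : Int) 2 = ((x % 2 : Nat) : Int) := by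
    exact_mod_cast PySem.Int.mod_natCast x 2
  have hy : PySem.Int.floordiv (y : Int) 2 = ((y / 2 : Nat) : Int) := by
    exact_mod_cast PySem.Int.floordiv_natCast y 2
  have hmy : PySem.Int.mod (y : Int) 2 = ((y % 2 : Nat) : Int) := by
    exact_mod_cast PySem.Int.mod_natCast y 2
  have hs : PySem.Int.mod (((x + y : Nat)) : Int) 2 = (((x + y) % 2 : Nat) : Int) := by
    exact_mod_cast PySem.Int.mod_natCast (x + y) 2
  rw [hs, hx, hmx, hy, hmy]
  split_ifs with h1 h2 h3 h4 h5 <;> simp_all <;> push_cast at * <;> omega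

-- ===== VERDICT (by name: the statement is the Claim_ definition above) =====
theorem minimumSwap_spec : Claim_equal_minimumSwap := by
  intro s1 s2 _ hpre
  unfold Spec_minimumSwap minimumSwap minimumSwap_alt
  dsimp only
  rw [show ((List.range s1.toList.length).foldl
      (fun (acc : List Char × List Char) i =>
        if s1.toList.getD i ' ' = s2.toList.getD i ' ' then acc
        else (acc.1 ++ [s1.toList.getD i ' '], acc.2 ++ [s2.toList.getD i ' '])) ([], []))
    = ((List.range s1.toList.length).map (fun i => (s1.toList.getD i ' ', s2.toList.getD i ' '))).foldl
      (fun (acc : List Char × List Char) p =>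
        if p.1 = p.2 then acc else (acc.1 ++ [p.1], acc.2 ++ [p.2])) ([], []) from (List.foldl_map (f := fun i => (s1.toList.getD i ' ', s2.toList.getD i ' '))
      (g := fun (acc : List Char × List Char) p => if p.1 = p.2 then acc else (acc.1 ++ [p.1], acc.2 ++ [p.2]))
      (l := List.range s1.toList.length) (init := (([], []) : List Char × List Char))).symm]
  rw [range_map_getD_eq_zip s1.toList s2.toList hpre]
  rw [fst_pair_fold, count_fold, bfold]
  have hxy : (((s1.toList.zip s2.toList).filter (fun p => !(p.1 == p.2))).map Prod.fst).length
      = xcnt (s1.toList.zip s2.toList) + ycnt (s1.toList.zip s2.toList) := by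
    unfold xcnt ycnt
    exact (countP_split _ _).symm
  simp only [hxy, Bool.toNat_false, Nat.add_zero, zero_add]
  exact arith_eq (xcnt (s1.toList.zip s2.toList)) (ycnt (s1.toList.zip s2.toList))
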